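-- pv_equiv track=rewrite | github.com/byeongkukoh/KBO | apps/api/app/services/season_center/standings.py | format_streak
-- ===== SOURCE A (Python) =====
-- def format_streak(results: list[str]) -> str:
--     if not results:
--         return "-"
--     last = results[-1]
--     if last == "D":
--         return "D1"
--     count = 0
--     for result in reversed(results):
--         if result != last:
--             break
--         count += 1
--     return f"{last}{count}"
-- ===== SOURCE B (Python) =====
-- def format_streak(results: list[str]) -> str:
--     cur = None
--     cnt = 0
--     for x in results:
--         if x == cur:
--             cnt += 1
--         else:
--             cur = x
--             cnt = 1
--     if cur is None:
--         return "-"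
--     if cur == "D":
--         return "D1"
--     return f"{cur}{cnt}"
-- ===== Notes on version B (the rewrite author's own statement) =====
-- stated objective: alternative
-- what changed: Replaces the backward early-exit scan over reversed(results) with a single forward run-length pass that keeps (cur, cnt) and resets cnt on every change, then applies the same edge cases.
import Mathlib
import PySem

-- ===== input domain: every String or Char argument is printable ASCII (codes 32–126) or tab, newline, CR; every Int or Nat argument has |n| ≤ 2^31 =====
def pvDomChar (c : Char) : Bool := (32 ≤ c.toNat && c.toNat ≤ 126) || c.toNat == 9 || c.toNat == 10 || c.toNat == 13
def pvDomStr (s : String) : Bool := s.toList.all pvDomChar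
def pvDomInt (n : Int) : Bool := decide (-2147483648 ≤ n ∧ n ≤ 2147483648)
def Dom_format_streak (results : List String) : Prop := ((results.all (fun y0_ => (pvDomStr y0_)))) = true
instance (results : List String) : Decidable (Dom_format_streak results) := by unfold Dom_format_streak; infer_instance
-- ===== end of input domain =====

-- B replaces A's backward early-exit scan with a forward run-length pass; objective: alternative decomposition.


-- ===== PORT A =====
-- the 'for result in reversed(results): if result != last: break; count += 1' loop
def pvCountLoopA (last : String) : List String → Int → Int
  | [], count => count
  | r :: rest, count => if r ≠ last then count else pvCountLoopA last rest (count + 1)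

def format_streak (results : List String) : String :=
  if results.isEmpty then "-"
  else
    -- results[-1]: list is nonempty here, so pyGet? is `some`; headD on the reverse is exact
    let last := results.reverse.headD ""
    if last = "D" then "D1"
    else last ++ PySem.Int.toStr (pvCountLoopA last results.reverse 0)

-- ===== PORT B =====
-- forward pass: cur starts as None, cnt resets to 1 on every change
def pvRunStep (st : Option (String × Int)) (x : String) : Option (String × Int) :=
  match st with
  | some (cur, cnt) => if x = cur then some (cur, cnt + 1) else some (x, 1)
  | none => some (x, 1)

def format_streak_alt (results : List String) : String :=
  match results.foldl pvRunStep none with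
  | none => "-"
  | some (cur, cnt) => if cur = "D" then "D1" else cur ++ PySem.Int.toStr cnt

-- ===== PRECONDITION & SPEC =====
def Spec_format_streak (results : List String) (out : String) : Prop := out = format_streak_alt results
instance (results : List String) (out : String) : Decidable (Spec_format_streak results out) := by unfold Spec_format_streak; infer_instance

-- ===== CLAIM (what is proved, stated in full; the proofs are below) =====
def Claim_equal_format_streak : Prop := ∀ (results : List String), Dom_format_streak results → Spec_format_streak results (format_streak results)

-- ===== LEMMAS AND PROOFS =====

theorem pvCountLoopA_acc (last : String) (l : List String) (c : Int) :
    pvCountLoopA last l c = pvCountLoopA last l 0 + c := by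
  induction l generalizing c with
  | nil => simp [pvCountLoopA]
  | cons r rest ih =>
    by_cases h : r = last
    · simp [pvCountLoopA, h]
      rw [ih (c + 1), ih 1]
      ring
    · simp [pvCountLoopA, h]

theorem pvFold_eq (results : List String) (h : results ≠ []) :
    results.foldl pvRunStep none =
      some (results.reverse.headD "", pvCountLoopA (results.reverse.headD "") results.reverse 0) := by
  induction results using List.reverseRecOn with
  | nil => exact absurd rfl h
  | append_singleton l x ih =>
    rw [List.foldl_append]
    simp only [List.reverse_append, List.reverse_singleton, List.singleton_append,
      List.headD_cons, List.foldl_cons, List.foldl_nil]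
    rcases Decidable.em (l = []) with hl | hl
    · subst hl
      simp [pvRunStep, pvCountLoopA]
    · rw [ih hl]
      by_cases hx : x = l.reverse.headD ""
      · subst hx
        have h1 : pvCountLoopA (l.reverse.headD "") (l.reverse.headD "" :: l.reverse) 0
            = pvCountLoopA (l.reverse.headD "") l.reverse 1 := by
          simp [pvCountLoopA]
        rw [h1, pvCountLoopA_acc]
        simp [pvRunStep]
        rw [pvCountLoopA_acc _ l.reverse 1]
      · simp only [pvRunStep, if_neg hx]
        have h1 : pvCountLoopA x (x :: l.reverse) 0 = pvCountLoopA x l.reverse 1 := by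
          simp [pvCountLoopA]
        rw [h1]
        rcases hrev : l.reverse with _ | ⟨y, ys⟩
        · exact absurd (by simpa using congrArg List.reverse hrev) hl
        · rw [hrev] at hx
          simp only [List.headD_cons] at hx
          simp only [pvCountLoopA]
          rw [if_pos (show y ≠ x from fun e => hx e.symm)]

-- ===== VERDICT (by name: the statement is the Claim_ definition above) =====
theorem format_streak_spec : Claim_equal_format_streak := by
  intro results _
  unfold Spec_format_streak format_streak format_streak_alt
  rcases Decidable.em (results = []) with h | h
  · subst h; rfl
  · rw [pvFold_eq results h]
    simp [List.isEmpty_iff, h]
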